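-- pv_equiv track=rewrite | github.com/Themath93/stock-manager | stock_manager/engine.py | _normalize_symbol_entries
-- ===== SOURCE A (Python) =====
-- from typing import Any, Literal, Optional
--
-- def _normalize_symbol_entries(values: Any) -> list[str]:
--     if not isinstance(values, (list, tuple, set)):
--         return []
--
--     normalized: list[str] = []
--     seen: set[str] = set()
--     for value in values:
--         symbol = str(value).strip().upper()
--         if not symbol:
--             continue
--         if symbol.startswith("A") and len(symbol) == 7 and symbol[1:].isdigit():
--             symbol = symbol[1:]
--         if symbol in seen:
--             continue
--         seen.add(symbol)
--         normalized.append(symbol)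
--
--     return normalized
-- ===== SOURCE B (Python) =====
-- def _normalize_one(value):
--     symbol = str(value).strip().upper()
--     if symbol.startswith("A") and len(symbol) == 7 and symbol[1:].isdigit():
--         return symbol[1:]
--     return symbol
--
--
-- def _normalize_symbol_entries(values):
--     if not isinstance(values, (list, tuple, set)):
--         return []
--     norm = [s for s in (_normalize_one(v) for v in values) if s]
--     # backward pass: overwrite so that first[s] ends as s's first-occurrence index
--     first = {}
--     for i in range(len(norm) - 1, -1, -1):
--         first[norm[i]] = i
--     # positional selection: keep norm[i] exactly when i is its first occurrence
--     return [s for i, s in enumerate(norm) if first[s] == i]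
-- ===== Notes on version B (the rewrite author's own statement) =====
-- stated objective: alternative
-- what changed: Replaces the single loop maintaining a seen-set with a staged pipeline: a normalization map/filter pass, a backward pass that overwrites a first-occurrence-index dict, and a positional selection keeping norm[i] exactly when first[norm[i]] == i.
import Mathlib
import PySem

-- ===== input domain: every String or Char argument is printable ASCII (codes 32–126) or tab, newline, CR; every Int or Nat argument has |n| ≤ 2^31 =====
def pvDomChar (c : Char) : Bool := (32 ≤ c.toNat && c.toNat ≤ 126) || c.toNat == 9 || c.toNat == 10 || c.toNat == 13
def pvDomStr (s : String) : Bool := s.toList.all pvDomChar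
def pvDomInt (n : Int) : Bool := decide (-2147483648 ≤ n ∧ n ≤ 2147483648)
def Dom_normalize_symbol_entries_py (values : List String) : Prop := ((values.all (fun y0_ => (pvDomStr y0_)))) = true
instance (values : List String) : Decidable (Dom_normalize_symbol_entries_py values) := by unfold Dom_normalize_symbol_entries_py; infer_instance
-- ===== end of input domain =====

-- B stages the work: a normalization map/filter pass, a backward pass overwriting a
-- first-occurrence-index dict, then a positional selection (keep norm[i] iff first[s] == i)
-- — no seen-set is maintained and no membership test grows with the output.

-- ===== PORT A =====
-- loop body of A's for-loop: state is (normalized, seen)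
def pvStepA (st : List String × PySem.Set String) (value : String) : List String × PySem.Set String :=
  let symbol := PySem.Str.upper (PySem.Str.strip value)
  if symbol = "" then st
  else
    let symbol :=
      if PySem.Str.startswith symbol "A" && (PySem.Str.len symbol == 7)
          && PySem.Str.strIsdigit (PySem.Str.slice symbol (some 1) none)
      then PySem.Str.slice symbol (some 1) none
      else symbol
    if PySem.Set.contains st.2 symbol then st
    else (st.1 ++ [symbol], PySem.Set.add st.2 symbol)

def normalize_symbol_entries_py (values : List String) : List String :=
  (values.foldl pvStepA ([], PySem.Set.empty)).1

-- ===== PORT B =====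
def pvNormalizeOne (value : String) : String :=
  let symbol := PySem.Str.upper (PySem.Str.strip value)
  if PySem.Str.startswith symbol "A" && (PySem.Str.len symbol == 7)
      && PySem.Str.strIsdigit (PySem.Str.slice symbol (some 1) none)
  then PySem.Str.slice symbol (some 1) none
  else symbol

def pvNorm (values : List String) : List String :=
  (values.map pvNormalizeOne).filter (fun s => !(s == ""))

def pvFirst (norm : List String) : PySem.Dict String Int :=
  (PySem.List.pyRange ((norm.length : Int) - 1) (-1) (-1)).foldl
    (fun d i => d.insert (PySem.List.pyGetD norm i "") i) PySem.Dict.empty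

def normalize_symbol_entries_py_alt (values : List String) : List String :=
  ((PySem.List.enumerate (pvNorm values) 0).filter
      (fun p => (pvFirst (pvNorm values)).get? p.2 == some p.1)).map Prod.snd

-- ===== PRECONDITION & SPEC =====
def Spec_normalize_symbol_entries_py (values : List String) (out : List String) : Prop := out = normalize_symbol_entries_py_alt values
instance (values : List String) (out : List String) : Decidable (Spec_normalize_symbol_entries_py values out) := by unfold Spec_normalize_symbol_entries_py; infer_instance

-- ===== CLAIM (what is proved, stated in full; the proofs are below) =====
def Claim_equal_normalize_symbol_entries_py : Prop := ∀ (values : List String), Dom_normalize_symbol_entries_py values → Spec_normalize_symbol_entries_py values (normalize_symbol_entries_py values)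

-- ===== LEMMAS AND PROOFS =====

-- When the stripped/uppercased string is empty, B's normalizer returns "".
theorem pvNormalizeOne_empty (v : String) (h : PySem.Str.upper (PySem.Str.strip v) = "") :
    pvNormalizeOne v = "" := by
  simp [pvNormalizeOne, h]

-- When it is nonempty, so is B's normalized symbol (isdigit of "" is false).
theorem pvNormalizeOne_ne_empty (v : String) (h : PySem.Str.upper (PySem.Str.strip v) ≠ "") :
    pvNormalizeOne v ≠ "" := by
  simp only [pvNormalizeOne]
  split
  · rename_i hc
    intro he
    rcases (Bool.and_eq_true _ _).mp hc with ⟨-, hd⟩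
    rw [he] at hd
    exact absurd hd (by decide)
  · exact h

-- One A-step rewritten through B's normalizer.
theorem pvStepA_eq (st : List String × PySem.Set String) (v : String) :
    pvStepA st v =
      if PySem.Str.upper (PySem.Str.strip v) = "" then st
      else if PySem.Set.contains st.2 (pvNormalizeOne v) then st
      else (st.1 ++ [pvNormalizeOne v], PySem.Set.add st.2 (pvNormalizeOne v)) := by
  by_cases h : PySem.Str.upper (PySem.Str.strip v) = ""
  · simp [pvStepA, h]
  · simp [pvStepA, pvNormalizeOne, h]

-- Core invariant: folding Set.add over l, starting from a set A with the same members
-- as the list pre, equals A followed by the prefix-scan dedup of l (relative to pre),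
-- where indices in 'enumerate l pre.length' address 'pre ++ l'.
theorem gen_prefix (l : List String) :
    ∀ (pre A : List String), (∀ x, x ∈ pre ↔ x ∈ A) →
    l.foldl PySem.Set.add A =
      A ++ ((PySem.List.enumerate l (pre.length : Int)).filter
        (fun p => !((PySem.List.slice (pre ++ l) none (some p.1)).contains p.2))).map Prod.snd := by
  induction l with
  | nil => intro pre A _; simp [PySem.List.enumerate_nil]
  | cons a t ih =>
    intro pre A hmem
    rw [PySem.List.enumerate_cons, List.filter_cons]
    have hslice : ∀ (k : Nat) (xs : List String),
        PySem.List.slice xs none (some (k : Int)) = xs.take k := by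
      intro k xs
      rw [PySem.List.slice_to xs (by positivity)]
      simp
    have htake : (pre ++ a :: t).take pre.length = pre := by simp
    have hcond : ((PySem.List.slice (pre ++ a :: t) none (some ((pre.length : Nat) : Int))).contains a)
        = decide (a ∈ A) := by
      rw [hslice, htake]
      simp only [List.contains_eq_mem]
      by_cases hA : a ∈ A
      · simp [hA, (hmem a).mpr hA]
      · have : a ∉ pre := fun h => hA ((hmem a).mp h)
        simp [hA, this]
    have hshift : ((pre.length : Int) + 1) = (((pre ++ [a]).length : Nat) : Int) := by simp
    have happ : pre ++ a :: t = (pre ++ [a]) ++ t := by simp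
    by_cases hA : a ∈ A
    · -- duplicate head: the set absorbs it; the head is filtered out
      have hadd : PySem.Set.add A a = A := by
        simp [PySem.Set.add, List.contains_eq_mem, hA]
      have hmem' : ∀ x, x ∈ pre ++ [a] ↔ x ∈ A := by
        intro x
        simp only [List.mem_append, List.mem_singleton]
        constructor
        · rintro (h | rfl)
          · exact (hmem x).mp h
          · exact hA
        · intro h; exact Or.inl ((hmem x).mpr h)
      rw [List.foldl_cons, hadd, hcond]
      simp only [hA, decide_true, Bool.not_true, Bool.false_eq_true, if_false]
      rw [hshift, happ]
      exact ih (pre ++ [a]) A hmem'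
    · -- new head: appended to the set; the head survives the filter
      have hadd : PySem.Set.add A a = A ++ [a] := by
        simp [PySem.Set.add, List.contains_eq_mem, hA]
      have hmem' : ∀ x, x ∈ pre ++ [a] ↔ x ∈ A ++ [a] := by
        intro x; simp [hmem x]
      rw [List.foldl_cons, hadd, hcond]
      simp only [hA, decide_false, Bool.not_false, if_true]
      rw [hshift, happ, ih (pre ++ [a]) (A ++ [a]) hmem']
      simp

-- Loop invariant for A: the state stays a duplicated pair, and the fold equals
-- folding Set.add over B's normalized list.
theorem loop_eq (l : List String) : ∀ (a : List String),
    (l.foldl pvStepA (a, a)).1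
      = ((l.map pvNormalizeOne).filter (fun s => !(s == ""))).foldl PySem.Set.add a := by
  induction l with
  | nil => intro a; rfl
  | cons v t ih =>
    intro a
    rw [List.foldl_cons, pvStepA_eq, List.map_cons, List.filter_cons]
    by_cases h : PySem.Str.upper (PySem.Str.strip v) = ""
    · rw [if_pos h, pvNormalizeOne_empty v h]
      simpa using ih a
    · rw [if_neg h]
      have hne := pvNormalizeOne_ne_empty v h
      have hbe : ((pvNormalizeOne v == "") = false) := by simp [hne]
      simp only [hbe, Bool.not_false]
      cases hb : PySem.Set.contains a (pvNormalizeOne v) with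
      | true =>
        have hadd : PySem.Set.add a (pvNormalizeOne v) = a := by
          simp only [PySem.Set.add, hb, if_true]
        rw [if_pos rfl, if_pos trivial, List.foldl_cons, hadd]
        exact ih a
      | false =>
        have hpair : (a ++ [pvNormalizeOne v], PySem.Set.add a (pvNormalizeOne v))
            = (PySem.Set.add a (pvNormalizeOne v), PySem.Set.add a (pvNormalizeOne v)) := by
          simp only [PySem.Set.add, hb, Bool.false_eq_true, if_false]
        rw [if_neg Bool.false_ne_true, hpair, if_pos trivial, List.foldl_cons]
        exact ih (PySem.Set.add a (pvNormalizeOne v))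

-- The backward overwrite loop computes each present symbol's FIRST index: after
-- folding over range(len(l)-1, -1, -1), get? s is the first occurrence index of s in l
-- (and the initial dict's answer for absent s).
theorem backfill (l : List String) : ∀ (d : PySem.Dict String Int) (s : String),
    ((PySem.List.pyRange ((l.length : Int) - 1) (-1) (-1)).foldl
        (fun d i => d.insert (PySem.List.pyGetD l i "") i) d).get? s
      = match PySem.List.index? l s with
        | some k => some (k : Int)
        | none => d.get? s := by
  induction l using List.reverseRecOn with
  | nil =>
    intro d s
    rw [PySem.List.pyRange_neg_one_eq_nil (by norm_num)]
    simp [PySem.List.index?_eq_idxOf?]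
  | append_singleton t a ih =>
    intro d s
    have hlen : ((t ++ [a]).length : Int) - 1 = (t.length : Int) := by simp
    rw [hlen, PySem.List.pyRange_neg_one_cons (by omega), List.foldl_cons]
    have hget : PySem.List.pyGetD (t ++ [a]) (t.length : Int) "" = a := by
      rw [PySem.List.pyGetD_natCast]
      simp
    rw [hget]
    have hcongr :
        (PySem.List.pyRange ((t.length : Int) - 1) (-1) (-1)).foldl
            (fun d i => d.insert (PySem.List.pyGetD (t ++ [a]) i "") i) (d.insert a (t.length : Int))
          = (PySem.List.pyRange ((t.length : Int) - 1) (-1) (-1)).foldl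
            (fun d i => d.insert (PySem.List.pyGetD t i "") i) (d.insert a (t.length : Int)) := by
      apply PySem.List.foldl_congr_mem
      intro acc i hi
      rcases (PySem.List.mem_pyRange_neg_one).mp hi with ⟨h1, h2⟩
      have h0 : 0 ≤ i := by omega
      have hlt : i.toNat < t.length := by omega
      have : PySem.List.pyGetD (t ++ [a]) i "" = PySem.List.pyGetD t i "" := by
        obtain ⟨k, rfl⟩ := Int.eq_ofNat_of_zero_le h0
        rw [PySem.List.pyGetD_natCast, PySem.List.pyGetD_natCast]
        rw [List.getD_eq_getElem?_getD, List.getD_eq_getElem?_getD,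
          List.getElem?_append_left (by exact_mod_cast hlt)]
      rw [this]
    rw [hcongr, ih (d.insert a (t.length : Int)) s]
    by_cases hst : s ∈ t
    · have h1 : PySem.List.index? (t ++ [a]) s = PySem.List.index? t s :=
        PySem.List.index?_append_of_mem [a] hst
      rw [h1]
      rcases (PySem.List.index?_isSome_iff t s).mpr hst |> Option.isSome_iff_exists.mp
        with ⟨k, hk⟩
      rw [hk]
    · have hnone : PySem.List.index? t s = none := (PySem.List.index?_eq_none_iff _ _).mpr hst
      rw [hnone]
      by_cases hsa : s = a
      · subst hsa
        rw [PySem.List.index?_append_singleton_self t s hst]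
        simp [PySem.Dict.get?_insert_self]
      · have : s ∉ t ++ [a] := by simp [hst, hsa]
        rw [(PySem.List.index?_eq_none_iff _ _).mpr this]
        simp [PySem.Dict.get?_insert_of_ne _ _ hsa]

-- Positional characterisation: index i is the first occurrence of xs[i]
-- exactly when xs[i] is absent from the prefix xs.take i.
theorem index?_eq_iff_not_mem_take (xs : List String) (k : Nat) (hk : k < xs.length) :
    PySem.List.index? xs xs[k] = some k ↔ xs[k] ∉ xs.take k := by
  constructor
  · intro h hmem
    rcases (PySem.List.index?_eq_some_iff _ _ _).mp h with ⟨pre, suf, hxs, hlen, hnot⟩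
    subst hlen
    have htk : xs.take pre.length = pre := by
      conv_lhs => rw [hxs]
      exact List.take_left
    rw [htk] at hmem
    exact hnot hmem
  · intro hmem
    apply (PySem.List.index?_eq_some_iff _ _ _).mpr
    refine ⟨xs.take k, xs.drop (k + 1), ?_, by simp [Nat.le_of_lt hk], hmem⟩
    rw [List.getElem_cons_drop, List.take_append_drop]

-- B's dict-based selection condition coincides with the prefix-scan condition on
-- every element of 'enumerate norm 0'.
theorem cond_eq (norm : List String) (p : Int × String) (hp : p ∈ PySem.List.enumerate norm 0) :
    ((pvFirst norm).get? p.2 == some p.1)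
      = !((PySem.List.slice norm none (some p.1)).contains p.2) := by
  unfold pvFirst
  rcases (PySem.List.mem_enumerate_iff _ _ _).mp hp with ⟨k, hk, rfl⟩
  simp only [Int.zero_add]
  rw [backfill]
  have hmem : norm[k] ∈ norm := List.getElem_mem hk
  rcases Option.isSome_iff_exists.mp ((PySem.List.index?_isSome_iff norm norm[k]).mpr hmem) with ⟨j, hj⟩
  rw [hj]
  have hslice : PySem.List.slice norm none (some ((k : Nat) : Int)) = norm.take k := by
    rw [PySem.List.slice_to norm (by positivity)]
    simp
  rw [hslice]
  by_cases hfirst : norm[k] ∈ norm.take k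
  · have hne : PySem.List.index? norm norm[k] ≠ some k :=
      fun h => ((index?_eq_iff_not_mem_take norm k hk).mp h) hfirst
    have hjk : j ≠ k := fun h => hne (h ▸ hj)
    simp [List.contains_eq_mem, hfirst, hjk]
  · have heq : PySem.List.index? norm norm[k] = some k :=
      (index?_eq_iff_not_mem_take norm k hk).mpr hfirst
    have hjk : j = k := by rw [hj] at heq; exact Option.some.inj heq
    simp [List.contains_eq_mem, hfirst, hjk]

-- ===== VERDICT (by name: the statement is the Claim_ definition above) =====
theorem normalize_symbol_entries_py_spec : Claim_equal_normalize_symbol_entries_py := by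
  intro values _
  unfold Spec_normalize_symbol_entries_py normalize_symbol_entries_py normalize_symbol_entries_py_alt
  have h0 : (PySem.Set.empty : PySem.Set String) = ([] : List String) := rfl
  rw [h0, loop_eq values []]
  rw [List.filter_congr (fun p hp => cond_eq (pvNorm values) p hp)]
  have := gen_prefix (pvNorm values) [] [] (by intro x; simp)
  unfold pvNorm
  simpa [pvNorm] using this
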